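-- pv_equiv track=rewrite | github.com/Saima-Chaity/Leetcode | Matrix/pathWithMinMaxValue.py | maximumMinimumPath
-- ===== SOURCE A (Python) =====
-- from typing import List
--
-- def maximumMinimumPath(A: List[List[int]]) -> int:
--   rows = len(A)
--   cols = len(A[0])
--   direction = [(0, 1), (1, 0), (0, -1), (-1, 0)]
--
--   def check(value):
--     memo = [[0 for _ in range(cols)] for _ in range(rows)]
--
--     def dfs(i, j):
--       if i == rows - 1 and j == cols - 1:
--         return True
--
--       memo[i][j] = 1
--       for x, y in direction:
--         xi = x + i
--         yj = y + j
--         if 0 <= xi < rows and 0 <= yj < cols and not memo[xi][yj] and A[xi][yj] >= value and dfs(xi, yj):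
--           return True
--       return False
--
--     return dfs(0, 0)
--
--   minValue = min(A[0][0], A[rows - 1][cols - 1])
--   unique = set()
--   for i in range(rows):
--     for j in range(cols):
--       if A[i][j] <= minValue:
--         unique.add(A[i][j])
--
--   arr = sorted(unique)
--   left = 0
--   right = len(arr) - 1
--   while left <= right:
--     mid = left + (right - left) // 2
--     if check(arr[mid]):
--       left = mid + 1
--     else:
--       right = mid - 1
--   return arr[right]
-- ===== SOURCE B (Python) =====
-- from typing import List
--
-- def maximumMinimumPath(A: List[List[int]]) -> int:
--   rows = len(A)
--   cols = len(A[0])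
--   cap = min(A[0][0], A[rows - 1][cols - 1])
--   arr = sorted({A[i][j] for i in range(rows) for j in range(cols) if A[i][j] <= cap})
--
--   def reachable(v):
--     reached = {(0, 0)}
--     for _ in range(rows * cols):
--       grew = False
--       for i in range(rows):
--         for j in range(cols):
--           if (i, j) in reached:
--             for (x, y) in ((i, j + 1), (i + 1, j), (i, j - 1), (i - 1, j)):
--               if 0 <= x < rows and 0 <= y < cols and (x, y) not in reached and A[x][y] >= v:
--                 reached.add((x, y))
--                 grew = True
--       if not grew:
--         break
--     return (rows - 1, cols - 1) in reached
--
--   best = arr[0]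
--   for v in arr[1:]:
--     if reachable(v):
--       best = v
--     else:
--       break
--   return best
-- ===== Notes on version B (the rewrite author's own statement) =====
-- stated objective: alternative
-- what changed: Binary search over thresholds with a recursive memoized DFS is replaced by an ascending linear scan over the sorted candidate values that stops at the first unreachable threshold, with reachability decided by an iterative fixed-point flood fill instead of recursion.
import Mathlib
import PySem

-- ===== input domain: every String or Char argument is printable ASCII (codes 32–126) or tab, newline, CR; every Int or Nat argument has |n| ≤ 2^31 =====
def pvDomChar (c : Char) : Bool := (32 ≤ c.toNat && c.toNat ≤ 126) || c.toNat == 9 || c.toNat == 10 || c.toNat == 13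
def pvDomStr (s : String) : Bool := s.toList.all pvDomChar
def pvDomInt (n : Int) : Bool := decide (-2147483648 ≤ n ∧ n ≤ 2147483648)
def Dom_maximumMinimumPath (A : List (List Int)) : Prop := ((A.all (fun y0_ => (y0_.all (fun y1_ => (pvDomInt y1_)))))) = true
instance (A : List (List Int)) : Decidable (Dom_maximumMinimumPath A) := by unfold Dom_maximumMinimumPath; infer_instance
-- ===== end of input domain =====

-- B replaces A's binary search + recursive memoized DFS by an ascending linear scan over the
-- sorted candidate values with an iterative fixed-point flood fill (objective: alternative
-- algorithm, not claimed faster). Return values agree on all non-raising inputs (Pre_ below).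

-- ===== PORT A =====
-- A[i][j] (both ports index the grid the same way; in-range under Pre_, negative index = from the end as in Python)
def pvAt (Ag : List (List Int)) (i j : Int) : Int :=
  PySem.List.pyGetD (PySem.List.pyGetD Ag i []) j 0

def pvDirs : List (Int × Int) := [(0, 1), (1, 0), (0, -1), (-1, 0)]

-- memo[i][j] (queried only at in-range non-negative indices)
def pvMemoAt (m : List (List Int)) (i j : Int) : Int :=
  PySem.List.pyGetD (PySem.List.pyGetD m i []) j 0

-- memo[i][j] = 1
def pvMark (m : List (List Int)) (i j : Int) : List (List Int) :=
  PySem.List.pySetD m i (PySem.List.pySetD (PySem.List.pyGetD m i []) j 1)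

mutual
  -- dfs(i, j) of A, with the mutated memo threaded through; fuel bounds the recursion depth
  -- (each recursive call marks a fresh cell, so rows*cols+1 fuel is never exhausted — proved below)
  def pvDfsA (Ag : List (List Int)) (rows cols value : Int) :
      Nat → Int → Int → List (List Int) → Bool × List (List Int)
    | 0, _, _, m => (false, m)
    | Nat.succ f, i, j, m =>
      if i = rows - 1 ∧ j = cols - 1 then (true, m)
      else pvDirsLoop Ag rows cols value f i j pvDirs (pvMark m i j)
  termination_by f _ _ _ => (f, 0)
  -- the 'for x, y in direction' loop with its early return
  def pvDirsLoop (Ag : List (List Int)) (rows cols value : Int) :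
      Nat → Int → Int → List (Int × Int) → List (List Int) → Bool × List (List Int)
    | _, _, _, [], m => (false, m)
    | f, i, j, (x, y) :: ds, m =>
      let xi := x + i
      let yj := y + j
      if 0 ≤ xi ∧ xi < rows ∧ 0 ≤ yj ∧ yj < cols ∧ pvMemoAt m xi yj = 0 ∧ value ≤ pvAt Ag xi yj then
        match pvDfsA Ag rows cols value f xi yj m with
        | (true, m') => (true, m')
        | (false, m') => pvDirsLoop Ag rows cols value f i j ds m'
      else pvDirsLoop Ag rows cols value f i j ds m
  termination_by f _ _ ds _ => (f, ds.length + 1)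
end

-- check(value): fresh memo, dfs(0, 0)
def pvCheck (Ag : List (List Int)) (rows cols value : Int) : Bool :=
  let memo := (PySem.List.pyRange 0 rows 1).map (fun _ => (PySem.List.pyRange 0 cols 1).map (fun _ => (0 : Int)))
  (pvDfsA Ag rows cols value (rows.toNat * cols.toNat + 1) 0 0 memo).1

-- the while left <= right binary-search loop; returns the final value of right
def pvBS (p : Int → Bool) (arr : List Int) (l r : Int) : Int :=
  if h : l ≤ r then
    let mid := l + PySem.Int.floordiv (r - l) 2
    if p (PySem.List.pyGetD arr mid 0) then pvBS p arr (mid + 1) r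
    else pvBS p arr l (mid - 1)
  else r
termination_by (r + 1 - l).toNat
decreasing_by
  · have h2 : 0 ≤ PySem.Int.floordiv (r - l) 2 ∧ PySem.Int.floordiv (r - l) 2 ≤ r - l := by
      rw [PySem.Int.floordiv_eq_ediv_of_pos (by omega)]
      constructor
      · exact Int.ediv_nonneg (by omega) (by omega)
      · exact le_trans (Int.ediv_le_self _ (by omega)) (by omega)
    simp_wf; omega
  · have h2 : 0 ≤ PySem.Int.floordiv (r - l) 2 ∧ PySem.Int.floordiv (r - l) 2 ≤ r - l := by
      rw [PySem.Int.floordiv_eq_ediv_of_pos (by omega)]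
      constructor
      · exact Int.ediv_nonneg (by omega) (by omega)
      · exact le_trans (Int.ediv_le_self _ (by omega)) (by omega)
    simp_wf; omega

def maximumMinimumPath (A : List (List Int)) : Int :=
  let rows : Int := A.length
  let cols : Int := ((PySem.List.pyGetD A 0 []) : List Int).length   -- len(A[0]); IndexError on A = [] excluded by Pre_
  let minValue := min (pvAt A 0 0) (pvAt A (rows - 1) (cols - 1))
  let unique : PySem.Set Int :=
    (PySem.List.pyRange 0 rows 1).foldl (fun u i =>
      (PySem.List.pyRange 0 cols 1).foldl (fun u j =>
        if pvAt A i j ≤ minValue then PySem.Set.add u (pvAt A i j) else u) u) PySem.Set.empty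
  let arr := PySem.List.sorted unique (fun x => x) false
  let right := pvBS (fun v => pvCheck A rows cols v) arr 0 ((arr.length : Int) - 1)
  PySem.List.pyGetD arr right 0   -- arr[right]; IndexError (arr = [], only when cols = 0) excluded by Pre_

-- ===== PORT B =====
-- the four neighbour candidates ((i, j+1), (i+1, j), (i, j-1), (i-1, j))
def pvNbrs (c : Int × Int) : List (Int × Int) :=
  [(c.1, c.2 + 1), (c.1 + 1, c.2), (c.1, c.2 - 1), (c.1 - 1, c.2)]

-- one pass of the flood fill: scan the grid, expand every reached cell; snd = grew
def pvPass (Ag : List (List Int)) (rows cols v : Int) (S : PySem.Set (Int × Int)) :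
    PySem.Set (Int × Int) × Bool :=
  (PySem.List.pyRange 0 rows 1).foldl (fun st i =>
    (PySem.List.pyRange 0 cols 1).foldl (fun st j =>
      if PySem.Set.contains st.1 (i, j) then
        (pvNbrs (i, j)).foldl (fun st w =>
          if 0 ≤ w.1 ∧ w.1 < rows ∧ 0 ≤ w.2 ∧ w.2 < cols ∧ ¬ PySem.Set.contains st.1 w ∧ v ≤ pvAt Ag w.1 w.2 then
            (PySem.Set.add st.1 w, true)
          else st) st
      else st) st) (S, false)

-- 'for _ in range(rows*cols): … if not grew: break'
def pvFlood (Ag : List (List Int)) (rows cols v : Int) :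
    Nat → PySem.Set (Int × Int) → PySem.Set (Int × Int)
  | 0, S => S
  | Nat.succ n, S =>
    let r := pvPass Ag rows cols v S
    if r.2 then pvFlood Ag rows cols v n r.1 else r.1

-- reachable(v)
def pvReachB (Ag : List (List Int)) (rows cols v : Int) : Bool :=
  PySem.Set.contains
    (pvFlood Ag rows cols v (rows.toNat * cols.toNat) (PySem.Set.add PySem.Set.empty ((0 : Int), (0 : Int))))
    (rows - 1, cols - 1)

-- 'best = …; for v in arr[1:]: if reachable(v): best = v else: break'
def pvScan (p : Int → Bool) : Int → List Int → Int
  | best, [] => best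
  | best, v :: vs => if p v then pvScan p v vs else best

def maximumMinimumPath_alt (A : List (List Int)) : Int :=
  let rows : Int := A.length
  let cols : Int := ((PySem.List.pyGetD A 0 []) : List Int).length   -- len(A[0]); IndexError on A = [] excluded by Pre_
  let cap := min (pvAt A 0 0) (pvAt A (rows - 1) (cols - 1))
  let arr := PySem.List.sorted
    (PySem.Set.ofList ((PySem.List.pyRange 0 rows 1).flatMap (fun i =>
      ((PySem.List.pyRange 0 cols 1).filter (fun j => pvAt A i j ≤ cap)).map (fun j => pvAt A i j))))
    (fun x => x) false
  pvScan (fun v => pvReachB A rows cols v) (PySem.List.pyGetD arr 0 0) (arr.drop 1)   -- arr[0]; arr = [] excluded by Pre_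

-- ===== PRECONDITION & SPEC =====
-- Pre_ excludes exactly the inputs on which A raises IndexError: the empty grid, an empty first
-- row, and ragged grids where some row is shorter than the first row.
def Pre_maximumMinimumPath (A : List (List Int)) : Prop :=
  A ≠ [] ∧ 0 < (A.headI).length ∧ ∀ row ∈ A, (A.headI).length ≤ row.length

instance (A : List (List Int)) : Decidable (Pre_maximumMinimumPath A) := by
  unfold Pre_maximumMinimumPath; infer_instance

def pvWitness_maximumMinimumPath : List (List Int) := [[5, 4, 5], [1, 2, 6], [7, 4, 6]]

def Spec_maximumMinimumPath (A : List (List Int)) (out : Int) : Prop := out = maximumMinimumPath_alt A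
instance (A : List (List Int)) (out : Int) : Decidable (Spec_maximumMinimumPath A out) := by unfold Spec_maximumMinimumPath; infer_instance

-- ===== CLAIM (what is proved, stated in full; the proofs are below) =====
def Claim_equal_maximumMinimumPath : Prop := ∀ (A : List (List Int)), Dom_maximumMinimumPath A → Pre_maximumMinimumPath A → Spec_maximumMinimumPath A (maximumMinimumPath A)

-- ===== LEMMAS AND PROOFS =====
set_option maxHeartbeats 1000000

-- ---------- shared graph notions ----------
def pvInb (rows cols : Int) (c : Int × Int) : Prop :=
  0 ≤ c.1 ∧ c.1 < rows ∧ 0 ≤ c.2 ∧ c.2 < cols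

def pvEdge (Ag : List (List Int)) (rows cols v : Int) (c w : Int × Int) : Prop :=
  (w.1 - c.1, w.2 - c.2) ∈ pvDirs ∧ pvInb rows cols w ∧ v ≤ pvAt Ag w.1 w.2

def pvReach (Ag : List (List Int)) (rows cols v : Int) (c w : Int × Int) : Prop :=
  Relation.ReflTransGen (pvEdge Ag rows cols v) c w

lemma pvEdge_form {Ag rows cols v} {c w : Int × Int} (h : pvEdge Ag rows cols v c w) :
    ∃ d ∈ pvDirs, w = (d.1 + c.1, d.2 + c.2) := by
  refine ⟨(w.1 - c.1, w.2 - c.2), h.1, ?_⟩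
  apply Prod.ext <;> dsimp only <;> omega

lemma pvEdge_mono {Ag rows cols v v'} (hv : v' ≤ v) {c w : Int × Int}
    (h : pvEdge Ag rows cols v c w) : pvEdge Ag rows cols v' c w :=
  ⟨h.1, h.2.1, le_trans hv h.2.2⟩

lemma pvReach_mono {Ag rows cols v v'} (hv : v' ≤ v) {c w : Int × Int}
    (h : pvReach Ag rows cols v c w) : pvReach Ag rows cols v' c w :=
  Relation.ReflTransGen.mono (fun _ _ hcw => pvEdge_mono hv hcw) h

lemma pvReach_elim {Ag rows cols v} {s t : Int × Int} (M : Int × Int → Prop)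
    (h0 : M s) (hstep : ∀ c w, M c → pvEdge Ag rows cols v c w → M w)
    (h : pvReach Ag rows cols v s t) : M t := by
  induction h with
  | refl => exact h0
  | tail _ hbc ih => exact hstep _ _ ih hbc

-- ---------- memo (A side) ----------
def pvMWF (m : List (List Int)) (rows cols : Int) : Prop :=
  m.length = rows.toNat ∧ ∀ row ∈ m, row.length = cols.toNat

def pvMarked (m : List (List Int)) (c : Int × Int) : Prop := pvMemoAt m c.1 c.2 ≠ 0

lemma pvPyGetD_cases {α : Type} (l : List α) (i : Int) (d : α) :
    PySem.List.pyGetD l i d = d ∨ PySem.List.pyGetD l i d ∈ l := by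
  unfold PySem.List.pyGetD
  cases h : PySem.List.pyGet? l i with
  | none => left; rfl
  | some x =>
    right
    first
      | exact PySem.List.mem_of_pyGet?_eq_some h
      | exact PySem.List.mem_of_pyGet?_eq_some _ h
      | exact PySem.List.mem_of_pyGet?_eq_some _ _ h
      | exact PySem.List.mem_of_pyGet?_eq_some _ _ _ h

lemma pvPyGetD_getElem {α : Type} (l : List α) (i : Int) (d : α) (h0 : 0 ≤ i)
    (hl : i.toNat < l.length) : PySem.List.pyGetD l i d = l[i.toNat] := by
  rw [PySem.List.pyGetD_eq_getElem (xs := l) (i := i) (d := d) h0 (by omega)]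

lemma pvMWF_mark {m rows cols} (hWF : pvMWF m rows cols) {i j : Int}
    (hi : pvInb rows cols (i, j)) : pvMWF (pvMark m i j) rows cols := by
  obtain ⟨hlen, hrow⟩ := hWF
  have h1 : 0 ≤ i := hi.1
  have h2 : i < rows := hi.2.1
  have h3 : 0 ≤ j := hi.2.2.1
  have hiN : i.toNat < m.length := by omega
  simp only [pvMark]
  rw [PySem.List.pySetD_of_nonneg _ _ h1, PySem.List.pySetD_of_nonneg _ _ h3,
    pvPyGetD_getElem m i [] h1 hiN]
  constructor
  · simpa using hlen
  · intro row hr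
    rcases List.mem_or_eq_of_mem_set hr with hmem | rfl
    · exact hrow _ hmem
    · simpa using hrow _ (List.getElem_mem hiN)

lemma pvMemoAt_mark {m rows cols} (hWF : pvMWF m rows cols) {i j : Int}
    (hi : pvInb rows cols (i, j)) {x y : Int} (hx : pvInb rows cols (x, y)) :
    pvMemoAt (pvMark m i j) x y = if x = i ∧ y = j then 1 else pvMemoAt m x y := by
  obtain ⟨hlen, hrow⟩ := hWF
  have hi1 : 0 ≤ i := hi.1
  have hi2 : i < rows := hi.2.1
  have hi3 : 0 ≤ j := hi.2.2.1
  have hi4 : j < cols := hi.2.2.2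
  have hx1 : 0 ≤ x := hx.1
  have hx2 : x < rows := hx.2.1
  have hx3 : 0 ≤ y := hx.2.2.1
  have hx4 : y < cols := hx.2.2.2
  have hiN : i.toNat < m.length := by omega
  have hxN : x.toNat < m.length := by omega
  have hrowlen : ∀ (k : Nat) (hk : k < m.length), (m[k]'hk).length = cols.toNat :=
    fun k hk => hrow _ (List.getElem_mem hk)
  have hsetlen : x.toNat < (m.set i.toNat ((m[i.toNat]).set j.toNat 1)).length := by
    simpa using hxN
  simp only [pvMark, pvMemoAt]
  rw [PySem.List.pySetD_of_nonneg _ _ hi1, PySem.List.pySetD_of_nonneg _ _ hi3,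
    pvPyGetD_getElem m i [] hi1 hiN,
    pvPyGetD_getElem _ x [] hx1 hsetlen,
    List.getElem_set]
  by_cases hxi : x = i
  · subst hxi
    rw [if_pos rfl]
    have hylen : y.toNat < ((m[x.toNat]).set j.toNat 1).length := by
      rw [List.length_set, hrowlen _ hxN]; omega
    rw [pvPyGetD_getElem _ y 0 hx3 hylen, List.getElem_set]
    by_cases hyj : y = j
    · rw [if_pos (by omega), if_pos ⟨rfl, hyj⟩]
    · rw [if_neg (by omega), if_neg (fun hcon => hyj hcon.2),
        pvPyGetD_getElem m x [] hx1 hxN,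
        pvPyGetD_getElem _ y 0 hx3 (by rw [hrowlen _ hxN]; omega)]
  · rw [if_neg (by omega), if_neg (fun hcon => hxi hcon.1),
      pvPyGetD_getElem m x [] hx1 hxN,
      pvPyGetD_getElem _ y 0 hx3 (by rw [hrowlen _ hxN]; omega)]

-- ---------- cell enumeration and counting ----------
def pvCells (rows cols : Int) : List (Int × Int) :=
  (List.range rows.toNat).flatMap (fun (i : Nat) => (List.range cols.toNat).map (fun (j : Nat) => ((i : Int), (j : Int))))

lemma pvMem_cells {rows cols : Int} {c : Int × Int} :
    c ∈ pvCells rows cols ↔ pvInb rows cols c := by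
  unfold pvCells pvInb
  constructor
  · intro h
    obtain ⟨i, hi, rest⟩ := List.mem_flatMap.mp h
    obtain ⟨j, hj, hceq⟩ := List.mem_map.mp rest
    rw [List.mem_range] at hi hj
    rw [← hceq]
    refine ⟨?_, ?_, ?_, ?_⟩ <;> dsimp only <;> omega
  · rintro ⟨h1, h2, h3, h4⟩
    apply List.mem_flatMap.mpr
    refine ⟨c.1.toNat, ?_, ?_⟩
    · exact List.mem_range.mpr (by omega)
    · apply List.mem_map.mpr
      refine ⟨c.2.toNat, ?_, ?_⟩
      · exact List.mem_range.mpr (by omega)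
      · have e1 : (c.1.toNat : Int) = c.1 := by omega
        have e2 : (c.2.toNat : Int) = c.2 := by omega
        rw [e1, e2]

lemma pvCells_length (rows cols : Int) :
    (pvCells rows cols).length = rows.toNat * cols.toNat := by
  unfold pvCells
  rw [List.length_flatMap]
  simp [List.map_const']

def pvUnmarked (m : List (List Int)) (rows cols : Int) : Nat :=
  (pvCells rows cols).countP (fun c => decide (pvMemoAt m c.1 c.2 = 0))

lemma pvCountP_lt {α : Type} (l : List α) (p q : α → Bool)
    (h : ∀ x ∈ l, q x = true → p x = true) (a : α) (ha : a ∈ l)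
    (hpa : p a = true) (hqa : q a = false) : l.countP q < l.countP p := by
  induction l with
  | nil => cases ha
  | cons b t ih =>
    have hsub : ∀ x ∈ t, q x = true → p x = true := fun x hx => h x (List.mem_cons_of_mem _ hx)
    have hle : t.countP q ≤ t.countP p := List.countP_mono_left hsub
    simp only [List.countP_cons]
    rcases List.mem_cons.mp ha with rfl | hat
    · simp [hpa, hqa]; omega
    · have h2 := ih hsub hat
      by_cases hqb : q b = true
      · have hpb := h b (List.mem_cons_self) hqb
        simp [hqb, hpb]; omega
      · simp only [Bool.not_eq_true] at hqb
        simp [hqb]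
        by_cases hpb : p b = true <;> simp [hpb] <;> omega

lemma pvUnmarked_mono {m m' : List (List Int)} {rows cols : Int}
    (h : ∀ c, pvInb rows cols c → pvMarked m c → pvMarked m' c) :
    pvUnmarked m' rows cols ≤ pvUnmarked m rows cols := by
  apply List.countP_mono_left
  intro c hc
  simp only [decide_eq_true_eq]
  intro h0
  by_contra hne
  exact hne (by_contra (fun hz => absurd (h c (pvMem_cells.mp hc) hz) (by simp [pvMarked, h0])))

lemma pvUnmarked_mark_lt {m rows cols} (hWF : pvMWF m rows cols) {i j : Int}
    (hi : pvInb rows cols (i, j)) (hz : pvMemoAt m i j = 0) :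
    pvUnmarked (pvMark m i j) rows cols < pvUnmarked m rows cols := by
  have hmain : ∀ x ∈ pvCells rows cols,
      (fun c : Int × Int => decide (pvMemoAt (pvMark m i j) c.1 c.2 = 0)) x = true →
      (fun c : Int × Int => decide (pvMemoAt m c.1 c.2 = 0)) x = true := by
    intro c hc hq
    simp only [decide_eq_true_eq] at hq ⊢
    rw [pvMemoAt_mark hWF hi (pvMem_cells.mp hc)] at hq
    by_cases he : c.1 = i ∧ c.2 = j
    · rw [if_pos he] at hq; cases hq
    · rwa [if_neg he] at hq
  have hpa : (fun c : Int × Int => decide (pvMemoAt m c.1 c.2 = 0)) (i, j) = true :=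
    decide_eq_true hz
  have hqa : (fun c : Int × Int => decide (pvMemoAt (pvMark m i j) c.1 c.2 = 0)) (i, j) = false := by
    show decide (pvMemoAt (pvMark m i j) i j = 0) = false
    apply decide_eq_false
    rw [pvMemoAt_mark hWF hi hi]
    simp
  exact pvCountP_lt _ _ _ hmain (i, j) (pvMem_cells.mpr hi) hpa hqa

lemma pvMarked_mark {m rows cols} (hWF : pvMWF m rows cols) {i j : Int}
    (hi : pvInb rows cols (i, j)) {c : Int × Int} (hc : pvInb rows cols c)
    (h : pvMarked m c) : pvMarked (pvMark m i j) c := by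
  unfold pvMarked at *
  rw [show c = (c.1, c.2) from rfl] at hc
  rw [pvMemoAt_mark hWF hi hc]
  split
  · simp
  · exact h

lemma pvMarked_mark_self {m rows cols} (hWF : pvMWF m rows cols) {i j : Int}
    (hi : pvInb rows cols (i, j)) : pvMarked (pvMark m i j) (i, j) := by
  unfold pvMarked
  rw [pvMemoAt_mark hWF hi hi]
  simp

-- ---------- the DFS master lemma (A side) ----------
def pvDfsConcl (Ag : List (List Int)) (rows cols v : Int) (i j : Int)
    (m : List (List Int)) (r : Bool × List (List Int)) : Prop :=
  pvMWF r.2 rows cols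
  ∧ (∀ c, pvInb rows cols c → pvMarked m c → pvMarked r.2 c)
  ∧ (r.1 = true → pvReach Ag rows cols v (i, j) (rows - 1, cols - 1))
  ∧ (r.1 = false → pvMarked r.2 (i, j)
      ∧ ∀ c, pvInb rows cols c → pvMarked r.2 c →
          pvMarked m c ∨ (c ≠ (rows - 1, cols - 1) ∧ ∀ w, pvEdge Ag rows cols v c w → pvMarked r.2 w))

def pvLoopConcl (Ag : List (List Int)) (rows cols v : Int) (i j : Int)
    (ds : List (Int × Int)) (m : List (List Int)) (r : Bool × List (List Int)) : Prop :=
  pvMWF r.2 rows cols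
  ∧ (∀ c, pvInb rows cols c → pvMarked m c → pvMarked r.2 c)
  ∧ (r.1 = true → ∃ w, pvEdge Ag rows cols v (i, j) w ∧ pvReach Ag rows cols v w (rows - 1, cols - 1))
  ∧ (r.1 = false →
      (∀ c, pvInb rows cols c → pvMarked r.2 c →
          pvMarked m c ∨ (c ≠ (rows - 1, cols - 1) ∧ ∀ w, pvEdge Ag rows cols v c w → pvMarked r.2 w))
      ∧ ∀ d ∈ ds, pvInb rows cols (d.1 + i, d.2 + j) → v ≤ pvAt Ag (d.1 + i) (d.2 + j) →
          pvMarked r.2 (d.1 + i, d.2 + j))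

theorem pvLoop_master (Ag : List (List Int)) (rows cols v : Int) (f : Nat)
    (IH : ∀ (i j : Int) m, pvMWF m rows cols → pvInb rows cols (i, j) →
      pvMemoAt m i j = 0 → pvUnmarked m rows cols < f →
      pvDfsConcl Ag rows cols v i j m (pvDfsA Ag rows cols v f i j m)) :
    ∀ (ds : List (Int × Int)), (∀ d ∈ ds, d ∈ pvDirs) → ∀ (i j : Int) m,
      pvMWF m rows cols → pvInb rows cols (i, j) → pvUnmarked m rows cols < f →
      pvLoopConcl Ag rows cols v i j ds m (pvDirsLoop Ag rows cols v f i j ds m) := by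
  intro ds
  induction ds with
  | nil =>
    intro _ i j m hWF hinb hcnt
    unfold pvLoopConcl
    simp only [pvDirsLoop]
    refine ⟨hWF, fun c _ h => h, ?_, ?_⟩
    · intro h; simp at h
    · intro _
      exact ⟨fun c _ hc => Or.inl hc, by intro d hd; simp at hd⟩
  | cons d ds' ih =>
    intro hds i j m hWF hinb hcnt
    obtain ⟨x, y⟩ := d
    unfold pvLoopConcl
    simp only [pvDirsLoop]
    by_cases hg : 0 ≤ x + i ∧ x + i < rows ∧ 0 ≤ y + j ∧ y + j < cols ∧
        pvMemoAt m (x + i) (y + j) = 0 ∧ v ≤ pvAt Ag (x + i) (y + j)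
    · rw [if_pos hg]
      have hinbw : pvInb rows cols (x + i, y + j) := ⟨hg.1, hg.2.1, hg.2.2.1, hg.2.2.2.1⟩
      have hdfs := IH (x + i) (y + j) m hWF hinbw hg.2.2.2.2.1 hcnt
      unfold pvDfsConcl at hdfs
      rcases hr : pvDfsA Ag rows cols v f (x + i) (y + j) m with ⟨b, m'⟩
      rw [hr] at hdfs
      cases b with
      | true =>
        obtain ⟨hWF', hmono', htrue', _⟩ := hdfs
        refine ⟨hWF', hmono', ?_, ?_⟩
        · intro _
          refine ⟨(x + i, y + j), ⟨?_, hinbw, hg.2.2.2.2.2⟩, htrue' rfl⟩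
          have heq : ((x + i) - i, (y + j) - j) = (x, y) := by
            apply Prod.ext <;> dsimp only <;> omega
          show ((x + i, y + j).1 - (i, j).1, (x + i, y + j).2 - (i, j).2) ∈ pvDirs
          dsimp only
          rw [heq]
          exact hds _ (List.mem_cons_self)
        · intro hcon; simp at hcon
      | false =>
        obtain ⟨hWF', hmono', _, hfalse'⟩ := hdfs
        obtain ⟨hmark', hclose'⟩ := hfalse' rfl
        have hcnt' : pvUnmarked m' rows cols < f :=
          lt_of_le_of_lt (pvUnmarked_mono hmono') hcnt
        have hloop := ih (fun e he => hds e (List.mem_cons_of_mem _ he)) i j m' hWF' hinb hcnt'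
        unfold pvLoopConcl at hloop
        obtain ⟨hWFR, hmonoR, htrueR, hfalseR⟩ := hloop
        refine ⟨hWFR, fun c hc hm => hmonoR c hc (hmono' c hc hm), htrueR, ?_⟩
        intro hbf
        obtain ⟨hcloseR, hdirR⟩ := hfalseR hbf
        constructor
        · intro c hc hm
          rcases hcloseR c hc hm with hmem' | hcl
          · rcases hclose' c hc hmem' with hm0 | ⟨hne, hnb⟩
            · exact Or.inl hm0
            · exact Or.inr ⟨hne, fun w hw => hmonoR w hw.2.1 (hnb w hw)⟩
          · exact Or.inr hcl
        · intro e he hinbe hall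
          rcases List.mem_cons.mp he with rfl | he'
          · exact hmonoR _ hinbe hmark'
          · exact hdirR e he' hinbe hall
    · rw [if_neg hg]
      have hloop := ih (fun e he => hds e (List.mem_cons_of_mem _ he)) i j m hWF hinb hcnt
      unfold pvLoopConcl at hloop
      obtain ⟨hWFR, hmonoR, htrueR, hfalseR⟩ := hloop
      refine ⟨hWFR, hmonoR, htrueR, ?_⟩
      intro hbf
      obtain ⟨hcloseR, hdirR⟩ := hfalseR hbf
      refine ⟨hcloseR, ?_⟩
      intro e he hinbe hall
      rcases List.mem_cons.mp he with rfl | he'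
      · have hmm : pvMemoAt m ((x, y).1 + i) ((x, y).2 + j) ≠ 0 := by
          intro hz
          exact hg ⟨hinbe.1, hinbe.2.1, hinbe.2.2.1, hinbe.2.2.2, hz, hall⟩
        exact hmonoR _ hinbe hmm
      · exact hdirR e he' hinbe hall

theorem pvDfs_master (Ag : List (List Int)) (rows cols v : Int) :
    ∀ (f : Nat) (i j : Int) m, pvMWF m rows cols → pvInb rows cols (i, j) →
      pvMemoAt m i j = 0 → pvUnmarked m rows cols < f →
      pvDfsConcl Ag rows cols v i j m (pvDfsA Ag rows cols v f i j m) := by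
  intro f
  induction f with
  | zero =>
    intro i j m _ _ _ hcnt
    exact absurd hcnt (Nat.not_lt_zero _)
  | succ f ihf =>
    intro i j m hWF hinb hz hcnt
    unfold pvDfsConcl
    simp only [pvDfsA]
    by_cases hd : i = rows - 1 ∧ j = cols - 1
    · rw [if_pos hd]
      refine ⟨hWF, fun c _ h => h, ?_, ?_⟩
      · intro _
        rw [hd.1, hd.2]
        exact Relation.ReflTransGen.refl
      · intro h; simp at h
    · rw [if_neg hd]
      have hWF1 := pvMWF_mark hWF hinb
      have hlt := pvUnmarked_mark_lt hWF hinb hz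
      have hcnt1 : pvUnmarked (pvMark m i j) rows cols < f := by omega
      have hloop := pvLoop_master Ag rows cols v f ihf pvDirs (fun e he => he) i j
        (pvMark m i j) hWF1 hinb hcnt1
      unfold pvLoopConcl at hloop
      obtain ⟨hWFR, hmonoR, htrueR, hfalseR⟩ := hloop
      have hm1mono : ∀ c, pvInb rows cols c → pvMarked m c → pvMarked (pvMark m i j) c :=
        fun c hc h => pvMarked_mark hWF hinb hc h
      refine ⟨hWFR, fun c hc h => hmonoR c hc (hm1mono c hc h), ?_, ?_⟩
      · intro ht
        obtain ⟨w, hew, hrw⟩ := htrueR ht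
        exact Relation.ReflTransGen.head hew hrw
      · intro hbf
        obtain ⟨hcloseR, hdirR⟩ := hfalseR hbf
        constructor
        · exact hmonoR _ hinb (pvMarked_mark_self hWF hinb)
        · intro c hc hm
          rcases hcloseR c hc hm with hm1c | hcl
          · by_cases he : c.1 = i ∧ c.2 = j
            · have hcij : c = (i, j) := Prod.ext he.1 he.2
              right
              constructor
              · rw [hcij]
                intro hcon
                exact hd ⟨congrArg Prod.fst hcon, congrArg Prod.snd hcon⟩
              · intro w hw
                rw [hcij] at hw
                obtain ⟨e, hev, hwe⟩ := pvEdge_form hw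
                rw [hwe] at hw ⊢
                exact hdirR e hev hw.2.1 hw.2.2
            · left
              unfold pvMarked at hm1c ⊢
              rw [pvMemoAt_mark hWF hinb hc] at hm1c
              rwa [if_neg he] at hm1c
          · exact Or.inr hcl

-- ---------- memo0 and pvCheck characterization ----------
lemma pvMemo0_at (rows cols : Int) (x y : Int) :
    pvMemoAt ((PySem.List.pyRange 0 rows 1).map (fun _ => (PySem.List.pyRange 0 cols 1).map (fun _ => (0 : Int)))) x y = 0 := by
  unfold pvMemoAt
  rcases pvPyGetD_cases ((PySem.List.pyRange 0 rows 1).map (fun _ => (PySem.List.pyRange 0 cols 1).map (fun _ => (0 : Int)))) x [] with he | hmem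
  · rw [he]
    rcases pvPyGetD_cases ([] : List Int) y 0 with he2 | he2
    · exact he2
    · cases he2
  · rw [List.mem_map] at hmem
    obtain ⟨_, _, heq⟩ := hmem
    rw [← heq]
    rcases pvPyGetD_cases ((PySem.List.pyRange 0 cols 1).map (fun _ => (0 : Int))) y 0 with he2 | hm2
    · exact he2
    · rw [List.mem_map] at hm2
      obtain ⟨_, _, h0⟩ := hm2
      exact h0.symm

lemma pvMemo0_WF (rows cols : Int) :
    pvMWF ((PySem.List.pyRange 0 rows 1).map (fun _ => (PySem.List.pyRange 0 cols 1).map (fun _ => (0 : Int)))) rows cols := by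
  constructor
  · rw [List.length_map, PySem.List.length_pyRange_one]
    simp
  · intro row hr
    rw [List.mem_map] at hr
    obtain ⟨_, _, heq⟩ := hr
    rw [← heq, List.length_map, PySem.List.length_pyRange_one]
    simp

lemma pvUnmarked_memo0 (rows cols : Int) :
    pvUnmarked ((PySem.List.pyRange 0 rows 1).map (fun _ => (PySem.List.pyRange 0 cols 1).map (fun _ => (0 : Int)))) rows cols = rows.toNat * cols.toNat := by
  unfold pvUnmarked
  rw [List.countP_eq_length.mpr, pvCells_length]
  intro c _
  exact decide_eq_true (pvMemo0_at rows cols c.1 c.2)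

theorem pvCheck_iff (Ag : List (List Int)) (rows cols v : Int)
    (hr : 0 < rows) (hc : 0 < cols) :
    pvCheck Ag rows cols v = true ↔ pvReach Ag rows cols v (0, 0) (rows - 1, cols - 1) := by
  have hinb0 : pvInb rows cols ((0 : Int), (0 : Int)) := ⟨le_refl 0, hr, le_refl 0, hc⟩
  have hmaster := pvDfs_master Ag rows cols v (rows.toNat * cols.toNat + 1) 0 0
    ((PySem.List.pyRange 0 rows 1).map (fun _ => (PySem.List.pyRange 0 cols 1).map (fun _ => (0 : Int))))
    (pvMemo0_WF rows cols) hinb0 (pvMemo0_at rows cols 0 0)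
    (by rw [pvUnmarked_memo0]; omega)
  unfold pvDfsConcl at hmaster
  obtain ⟨_, _, htrue, hfalse⟩ := hmaster
  constructor
  · exact htrue
  · intro hreach
    by_contra hne
    have hbf : (pvDfsA Ag rows cols v (rows.toNat * cols.toNat + 1) 0 0
        ((PySem.List.pyRange 0 rows 1).map (fun _ => (PySem.List.pyRange 0 cols 1).map (fun _ => (0 : Int))))).1 = false := by
      cases hb : (pvDfsA Ag rows cols v (rows.toNat * cols.toNat + 1) 0 0
        ((PySem.List.pyRange 0 rows 1).map (fun _ => (PySem.List.pyRange 0 cols 1).map (fun _ => (0 : Int))))).1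
      · rfl
      · exact absurd hb hne
    obtain ⟨hmark0, hclose⟩ := hfalse hbf
    have hdest := pvReach_elim
      (fun c => pvInb rows cols c ∧ pvMarked (pvDfsA Ag rows cols v (rows.toNat * cols.toNat + 1) 0 0
        ((PySem.List.pyRange 0 rows 1).map (fun _ => (PySem.List.pyRange 0 cols 1).map (fun _ => (0 : Int))))).2 c)
      ⟨hinb0, hmark0⟩
      (by
        intro c w hcM hcw
        rcases hclose c hcM.1 hcM.2 with hm0 | ⟨_, hnb⟩
        · exact absurd (pvMemo0_at rows cols c.1 c.2) hm0
        · exact ⟨hcw.2.1, hnb w hcw⟩)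
      hreach
    rcases hclose _ hdest.1 hdest.2 with hm0 | ⟨hneq, _⟩
    · exact absurd (pvMemo0_at rows cols _ _) hm0
    · exact hneq rfl

-- ---------- B side: pass / flood characterization ----------
lemma pvFoldlInv {α σ : Type} (l : List α) (f : σ → α → σ) (P : σ → Prop) (init : σ)
    (h0 : P init) (hstep : ∀ s a, a ∈ l → P s → P (f s a)) : P (l.foldl f init) := by
  induction l generalizing init with
  | nil => exact h0
  | cons a t ih =>
    exact ih (f init a) (hstep init a (List.mem_cons_self) h0)
      (fun s b hb => hstep s b (List.mem_cons_of_mem _ hb))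

lemma pvFoldStuck {α σ : Type} (l : List α) (f : σ → α → σ) (s0 : σ) (flag : σ → Bool)
    (hstep : ∀ s a, a ∈ l → flag (f s a) = false → f s a = s)
    (hfin : flag (l.foldl f s0) = false) :
    l.foldl f s0 = s0 ∧ ∀ a ∈ l, f s0 a = s0 := by
  induction l generalizing s0 with
  | nil => exact ⟨rfl, by simp⟩
  | cons a t ih =>
    have hstept : ∀ s b, b ∈ t → flag (f s b) = false → f s b = s :=
      fun s b hb => hstep s b (List.mem_cons_of_mem _ hb)
    simp only [List.foldl_cons] at hfin ⊢
    obtain ⟨h1, h2⟩ := ih (f s0 a) hstept hfin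
    have hfa : flag (f s0 a) = false := by rw [← h1]; exact hfin
    have ha : f s0 a = s0 := hstep s0 a (List.mem_cons_self) hfa
    rw [ha] at h1 h2 ⊢
    exact ⟨h1, fun b hb => by
      rcases List.mem_cons.mp hb with rfl | hbt
      · exact ha
      · exact h2 b hbt⟩

-- named forms of the three nested fold bodies of pvPass
def pvNStep (Ag : List (List Int)) (rows cols v : Int)
    (st : PySem.Set (Int × Int) × Bool) (w : Int × Int) : PySem.Set (Int × Int) × Bool :=
  if 0 ≤ w.1 ∧ w.1 < rows ∧ 0 ≤ w.2 ∧ w.2 < cols ∧ ¬ PySem.Set.contains st.1 w ∧ v ≤ pvAt Ag w.1 w.2 then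
    (PySem.Set.add st.1 w, true)
  else st

def pvCStep (Ag : List (List Int)) (rows cols v : Int) (i : Int)
    (st : PySem.Set (Int × Int) × Bool) (j : Int) : PySem.Set (Int × Int) × Bool :=
  if PySem.Set.contains st.1 (i, j) then (pvNbrs (i, j)).foldl (pvNStep Ag rows cols v) st else st

def pvRStep (Ag : List (List Int)) (rows cols v : Int)
    (st : PySem.Set (Int × Int) × Bool) (i : Int) : PySem.Set (Int × Int) × Bool :=
  (PySem.List.pyRange 0 cols 1).foldl (pvCStep Ag rows cols v i) st

lemma pvPass_eq (Ag : List (List Int)) (rows cols v : Int) (S : PySem.Set (Int × Int)) :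
    pvPass Ag rows cols v S = (PySem.List.pyRange 0 rows 1).foldl (pvRStep Ag rows cols v) (S, false) := rfl

def pvGoodSt (Ag : List (List Int)) (rows cols v : Int) (S : PySem.Set (Int × Int))
    (st : PySem.Set (Int × Int) × Bool) : Prop :=
  (∀ c ∈ st.1, pvInb rows cols c ∧ pvReach Ag rows cols v (0, 0) c)
  ∧ st.1.Nodup ∧ S <+: st.1 ∧ (st.2 = true → S.length < st.1.length)

theorem pvPass_good (Ag : List (List Int)) (rows cols v : Int) (S : PySem.Set (Int × Int))
    (hg : ∀ c ∈ S, pvInb rows cols c ∧ pvReach Ag rows cols v (0, 0) c) (hnd : S.Nodup) :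
    pvGoodSt Ag rows cols v S (pvPass Ag rows cols v S) := by
  rw [pvPass_eq]
  apply pvFoldlInv _ _ (pvGoodSt Ag rows cols v S) (S, false)
  · exact ⟨hg, hnd, List.prefix_refl _, fun h => by simp at h⟩
  · intro st i _ hP
    apply pvFoldlInv _ _ (pvGoodSt Ag rows cols v S) st hP
    intro st2 j _ hP2
    unfold pvCStep
    by_cases hcon : PySem.Set.contains st2.1 (i, j) = true
    · rw [if_pos hcon]
      have hreachij : pvReach Ag rows cols v (0, 0) (i, j) :=
        (hP2.1 _ ((PySem.Set.contains_iff _ _).mp hcon)).2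
      apply pvFoldlInv _ _ (pvGoodSt Ag rows cols v S) st2 hP2
      intro st3 w hwmem hP3
      unfold pvNStep
      by_cases hgg : 0 ≤ w.1 ∧ w.1 < rows ∧ 0 ≤ w.2 ∧ w.2 < cols ∧
          ¬ PySem.Set.contains st3.1 w = true ∧ v ≤ pvAt Ag w.1 w.2
      · rw [if_pos hgg]
        obtain ⟨hg1, hg2, hg3, hg4⟩ := hP3
        have hwnot : w ∉ st3.1 := fun hmm => hgg.2.2.2.2.1 ((PySem.Set.contains_iff _ _).mpr hmm)
        have hwinb : pvInb rows cols w := ⟨hgg.1, hgg.2.1, hgg.2.2.1, hgg.2.2.2.1⟩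
        have hedge : pvEdge Ag rows cols v (i, j) w := by
          refine ⟨?_, hwinb, hgg.2.2.2.2.2⟩
          simp only [pvNbrs, List.mem_cons, List.not_mem_nil, or_false] at hwmem
          rcases hwmem with h4 | h4 | h4 | h4 <;> rw [h4] <;>
            simp only [pvDirs, List.mem_cons, List.not_mem_nil, or_false, Prod.mk.injEq] <;> omega
        refine ⟨?_, ?_, ?_, ?_⟩
        · intro c hcmem
          rcases (PySem.Set.mem_add _ _ _).mp hcmem with hcold | rfl
          · exact hg1 c hcold
          · exact ⟨hwinb, Relation.ReflTransGen.tail hreachij hedge⟩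
        · exact PySem.Set.nodup_add _ _ hg2
        · refine hg3.trans ?_
          rw [PySem.Set.add_of_not_mem hwnot]
          exact List.prefix_append _ _
        · intro _
          have hlen : (PySem.Set.add st3.1 w).length = st3.1.length + 1 := by
            rw [PySem.Set.add_of_not_mem hwnot]; simp
          have hle := hg3.length_le
          dsimp only at hlen ⊢
          omega
      · rw [if_neg hgg]; exact hP3
    · rw [if_neg hcon]; exact hP2

theorem pvPass_stuck (Ag : List (List Int)) (rows cols v : Int) (S : PySem.Set (Int × Int))
    (h : (pvPass Ag rows cols v S).2 = false)
    (hmem : ∀ c ∈ S, pvInb rows cols c) :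
    (pvPass Ag rows cols v S).1 = S ∧
      ∀ c ∈ S, ∀ w, pvEdge Ag rows cols v c w → w ∈ S := by
  have hN : ∀ (st : PySem.Set (Int × Int) × Bool) (w : Int × Int),
      (pvNStep Ag rows cols v st w).2 = false → pvNStep Ag rows cols v st w = st := by
    intro st w hh
    unfold pvNStep at hh ⊢
    by_cases hgg : 0 ≤ w.1 ∧ w.1 < rows ∧ 0 ≤ w.2 ∧ w.2 < cols ∧
        ¬ PySem.Set.contains st.1 w = true ∧ v ≤ pvAt Ag w.1 w.2
    · rw [if_pos hgg] at hh; simp at hh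
    · rw [if_neg hgg]
  have hC : ∀ (i : Int) st (j : Int),
      (pvCStep Ag rows cols v i st j).2 = false → pvCStep Ag rows cols v i st j = st := by
    intro i st j hh
    unfold pvCStep at hh ⊢
    by_cases hcon : PySem.Set.contains st.1 (i, j) = true
    · rw [if_pos hcon] at hh ⊢
      exact (pvFoldStuck _ _ st (·.2) (fun s a _ ha => hN s a ha) hh).1
    · rw [if_neg hcon]
  have hRst : ∀ st (i : Int),
      (pvRStep Ag rows cols v st i).2 = false → pvRStep Ag rows cols v st i = st := by
    intro st i hh
    unfold pvRStep at hh ⊢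
    exact (pvFoldStuck _ _ st (·.2) (fun s a _ ha => hC i s a ha) hh).1
  have hfold := pvFoldStuck (PySem.List.pyRange 0 rows 1) (pvRStep Ag rows cols v) (S, false)
    (·.2) (fun s a _ ha => hRst s a ha) (by rw [← pvPass_eq]; exact h)
  constructor
  · rw [pvPass_eq, hfold.1]
  · intro c hcS w hEdge
    have hcinb := hmem c hcS
    have h1 : pvRStep Ag rows cols v (S, false) c.1 = (S, false) :=
      hfold.2 _ (PySem.List.mem_pyRange_one.mpr ⟨hcinb.1, hcinb.2.1⟩)
    have hfold2 := pvFoldStuck (PySem.List.pyRange 0 cols 1) (pvCStep Ag rows cols v c.1) (S, false)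
      (·.2) (fun s a _ ha => hC c.1 s a ha)
      (by rw [show (PySem.List.pyRange 0 cols 1).foldl (pvCStep Ag rows cols v c.1) (S, false) =
        pvRStep Ag rows cols v (S, false) c.1 from rfl, h1])
    have h2 : pvCStep Ag rows cols v c.1 (S, false) c.2 = (S, false) :=
      hfold2.2 _ (PySem.List.mem_pyRange_one.mpr ⟨hcinb.2.2.1, hcinb.2.2.2⟩)
    have hcontains : PySem.Set.contains ((S, false) : PySem.Set (Int × Int) × Bool).1 (c.1, c.2) = true := by
      apply (PySem.Set.contains_iff _ _).mpr
      show (c.1, c.2) ∈ S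
      exact hcS
    rw [pvCStep, if_pos hcontains] at h2
    have hfold3 := pvFoldStuck (pvNbrs (c.1, c.2)) (pvNStep Ag rows cols v) (S, false)
      (·.2) (fun s a _ ha => hN s a ha) (by rw [h2])
    obtain ⟨d, hd, hwd⟩ := pvEdge_form hEdge
    have hw : w ∈ pvNbrs (c.1, c.2) := by
      simp only [pvDirs, List.mem_cons, List.not_mem_nil, or_false] at hd
      rcases hd with h4 | h4 | h4 | h4 <;> rw [h4] at hwd <;> rw [hwd] <;>
        simp only [pvNbrs, List.mem_cons, List.not_mem_nil, or_false, Prod.mk.injEq] <;> omega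
    have h3 := hfold3.2 w hw
    by_contra hws
    have hguard : 0 ≤ w.1 ∧ w.1 < rows ∧ 0 ≤ w.2 ∧ w.2 < cols ∧
        ¬ PySem.Set.contains ((S, false) : PySem.Set (Int × Int) × Bool).1 w = true ∧
        v ≤ pvAt Ag w.1 w.2 := by
      obtain ⟨_, hwinb, hallow⟩ := hEdge
      exact ⟨hwinb.1, hwinb.2.1, hwinb.2.2.1, hwinb.2.2.2,
        fun hcc => hws ((PySem.Set.contains_iff _ _).mp hcc), hallow⟩
    rw [pvNStep, if_pos hguard] at h3
    have := congrArg Prod.snd h3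
    simp at this

theorem pvFlood_spec (Ag : List (List Int)) (rows cols v : Int) :
    ∀ (n : Nat) (S : PySem.Set (Int × Int)),
      (∀ c ∈ S, pvInb rows cols c ∧ pvReach Ag rows cols v (0, 0) c) → S.Nodup →
      rows.toNat * cols.toNat + 1 ≤ n + S.length →
      (∀ c ∈ pvFlood Ag rows cols v n S, pvInb rows cols c ∧ pvReach Ag rows cols v (0, 0) c)
      ∧ (∀ c ∈ S, c ∈ pvFlood Ag rows cols v n S)
      ∧ (∀ c ∈ pvFlood Ag rows cols v n S, ∀ w, pvEdge Ag rows cols v c w → w ∈ pvFlood Ag rows cols v n S) := by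
  intro n
  induction n with
  | zero =>
    intro S hg hnd hlenS
    exfalso
    have hsub : S ⊆ pvCells rows cols := fun c hc => pvMem_cells.mpr (hg c hc).1
    have hle := (List.Nodup.subperm hnd hsub).length_le
    rw [pvCells_length] at hle
    omega
  | succ n ih =>
    intro S hg hnd hlenS
    simp only [pvFlood]
    cases hgrew : (pvPass Ag rows cols v S).2 with
    | false =>
      simp only [hgrew, Bool.false_eq_true, if_false]
      obtain ⟨hunch, hclosed⟩ := pvPass_stuck Ag rows cols v S hgrew (fun c hc => (hg c hc).1)
      rw [hunch]
      exact ⟨hg, fun c hc => hc, hclosed⟩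
    | true =>
      simp only [hgrew, if_true]
      have hPg := pvPass_good Ag rows cols v S hg hnd
      unfold pvGoodSt at hPg
      obtain ⟨hg', hnd', hpre, hlt⟩ := hPg
      have hlen' : rows.toNat * cols.toNat + 1 ≤ n + (pvPass Ag rows cols v S).1.length := by
        have := hlt hgrew; omega
      obtain ⟨c1, c2, c3⟩ := ih (pvPass Ag rows cols v S).1 hg' hnd' hlen'
      exact ⟨c1, fun c hc => c2 c (hpre.subset hc), c3⟩

theorem pvReachB_iff (Ag : List (List Int)) (rows cols v : Int)
    (hr : 0 < rows) (hc : 0 < cols) :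
    pvReachB Ag rows cols v = true ↔ pvReach Ag rows cols v (0, 0) (rows - 1, cols - 1) := by
  have hS0 : PySem.Set.add (PySem.Set.empty) ((0 : Int), (0 : Int)) = [((0 : Int), (0 : Int))] := rfl
  have hinb0 : pvInb rows cols ((0 : Int), (0 : Int)) := ⟨le_refl 0, hr, le_refl 0, hc⟩
  have hg0 : ∀ c ∈ PySem.Set.add (PySem.Set.empty) ((0 : Int), (0 : Int)),
      pvInb rows cols c ∧ pvReach Ag rows cols v (0, 0) c := by
    intro c hcmem
    rw [hS0, List.mem_singleton] at hcmem
    rw [hcmem]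
    exact ⟨hinb0, Relation.ReflTransGen.refl⟩
  have hnd0 : (PySem.Set.add (PySem.Set.empty) ((0 : Int), (0 : Int))).Nodup := by
    rw [hS0]; simp
  obtain ⟨hgF, hSF, hclosedF⟩ := pvFlood_spec Ag rows cols v (rows.toNat * cols.toNat)
    (PySem.Set.add (PySem.Set.empty) ((0 : Int), (0 : Int))) hg0 hnd0
    (by rw [hS0]; simp)
  unfold pvReachB
  constructor
  · intro hcont
    exact (hgF _ ((PySem.Set.contains_iff _ _).mp hcont)).2
  · intro hreach
    apply (PySem.Set.contains_iff _ _).mpr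
    exact pvReach_elim (fun c => c ∈ pvFlood Ag rows cols v (rows.toNat * cols.toNat)
        (PySem.Set.add (PySem.Set.empty) ((0 : Int), (0 : Int))))
      (hSF _ (by rw [hS0]; exact List.mem_singleton.mpr rfl))
      (fun c w hc hcw => hclosedF c hc w hcw) hreach

lemma pvPred_eq (Ag : List (List Int)) (rows cols : Int) (hr : 0 < rows) (hc : 0 < cols) (v : Int) :
    pvReachB Ag rows cols v = pvCheck Ag rows cols v := by
  rcases hB : pvReachB Ag rows cols v <;> rcases hA : pvCheck Ag rows cols v
  · rfl
  · exact absurd ((pvReachB_iff Ag rows cols v hr hc).mpr ((pvCheck_iff Ag rows cols v hr hc).mp hA)) (by simp [hB])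
  · exact absurd ((pvCheck_iff Ag rows cols v hr hc).mpr ((pvReachB_iff Ag rows cols v hr hc).mp hB)) (by simp [hA])
  · rfl

-- ---------- staircase: everything is reachable at the minimal threshold ----------
theorem pvReach_all (Ag : List (List Int)) (rows cols v : Int)
    (hr : 0 < rows) (hc : 0 < cols)
    (hall : ∀ c, pvInb rows cols c → v ≤ pvAt Ag c.1 c.2) :
    pvReach Ag rows cols v (0, 0) (rows - 1, cols - 1) := by
  have hrowW : ∀ k : Nat, (k : Int) ≤ cols - 1 → pvReach Ag rows cols v (0, 0) (0, (k : Int)) := by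
    intro k
    induction k with
    | zero => intro _; exact Relation.ReflTransGen.refl
    | succ n ihn =>
      intro hk
      have hn : (n : Int) ≤ cols - 1 := by push_cast at hk ⊢; omega
      apply Relation.ReflTransGen.tail (ihn hn)
      have hwinb : pvInb rows cols ((0 : Int), ((n + 1 : Nat) : Int)) := by
        refine ⟨le_refl 0, hr, ?_, ?_⟩ <;> dsimp only <;> push_cast at hk ⊢ <;> omega
      refine ⟨?_, hwinb, hall _ hwinb⟩
      show ((0 : Int) - 0, ((n + 1 : Nat) : Int) - ((n : Nat) : Int)) ∈ pvDirs
      have hoff : ((0 : Int) - 0, ((n + 1 : Nat) : Int) - ((n : Nat) : Int)) = ((0 : Int), (1 : Int)) := by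
        have h1 : (0 : Int) - 0 = 0 := by omega
        have h2 : ((n + 1 : Nat) : Int) - ((n : Nat) : Int) = 1 := by push_cast; omega
        rw [h1, h2]
      rw [hoff]
      simp [pvDirs]
  have hcolW : ∀ k : Nat, (k : Int) ≤ rows - 1 →
      pvReach Ag rows cols v (0, cols - 1) ((k : Int), cols - 1) := by
    intro k
    induction k with
    | zero => intro _; exact Relation.ReflTransGen.refl
    | succ n ihn =>
      intro hk
      have hn : (n : Int) ≤ rows - 1 := by push_cast at hk ⊢; omega
      apply Relation.ReflTransGen.tail (ihn hn)
      have hwinb : pvInb rows cols (((n + 1 : Nat) : Int), cols - 1) := by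
        refine ⟨?_, ?_, ?_, ?_⟩ <;> dsimp only <;> push_cast at hk ⊢ <;> omega
      refine ⟨?_, hwinb, hall _ hwinb⟩
      show (((n + 1 : Nat) : Int) - ((n : Nat) : Int), (cols - 1) - (cols - 1)) ∈ pvDirs
      have hoff : (((n + 1 : Nat) : Int) - ((n : Nat) : Int), (cols - 1) - (cols - 1)) = ((1 : Int), (0 : Int)) := by
        have h1 : (cols - 1) - (cols - 1) = 0 := by omega
        have h2 : ((n + 1 : Nat) : Int) - ((n : Nat) : Int) = 1 := by push_cast; omega
        rw [h1, h2]
      rw [hoff]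
      simp [pvDirs]
  have h1 : pvReach Ag rows cols v (0, 0) (0, cols - 1) := by
    have h := hrowW (cols - 1).toNat (by omega)
    rwa [show (((cols - 1).toNat : Nat) : Int) = cols - 1 from by omega] at h
  have h2 : pvReach Ag rows cols v (0, cols - 1) (rows - 1, cols - 1) := by
    have h := hcolW (rows - 1).toNat (by omega)
    rwa [show (((rows - 1).toNat : Nat) : Int) = rows - 1 from by omega] at h
  exact Relation.ReflTransGen.trans h1 h2

-- ---------- binary search characterization ----------
theorem pvBS_inv (p : Int → Bool) (arr : List Int)
    (hmono : ∀ a b : Nat, (hab : a ≤ b) → (hb : b < arr.length) →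
      p (arr[b]'hb) = true → p (arr[a]'(by omega)) = true) :
    ∀ (N : Nat) (l r : Int), (r + 1 - l).toNat ≤ N → 0 ≤ l → r < (arr.length : Int) → l ≤ r + 1 →
    (∀ k : Nat, (hk : k < arr.length) → (k : Int) < l → p (arr[k]'hk) = true) →
    (∀ k : Nat, (hk : k < arr.length) → r < (k : Int) → p (arr[k]'hk) = false) →
    -1 ≤ pvBS p arr l r ∧ pvBS p arr l r < (arr.length : Int) ∧
      ∀ k : Nat, (hk : k < arr.length) → ((k : Int) ≤ pvBS p arr l r ↔ p (arr[k]'hk) = true) := by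
  intro N
  induction N with
  | zero =>
    intro l r hN h0 hrlen hlr htrue hfalse
    rw [pvBS, dif_neg (by omega : ¬ l ≤ r)]
    refine ⟨by omega, hrlen, ?_⟩
    intro k hk
    constructor
    · intro hkr; exact htrue k hk (by omega)
    · intro hpk
      by_contra hgt
      have hf := hfalse k hk (by omega)
      rw [hpk] at hf; cases hf
  | succ N ihN =>
    intro l r hN h0 hrlen hlr htrue hfalse
    by_cases hle : l ≤ r
    · rw [pvBS, dif_pos hle]
      dsimp only
      have hdb : 0 ≤ PySem.Int.floordiv (r - l) 2 ∧ PySem.Int.floordiv (r - l) 2 ≤ r - l := by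
        rw [PySem.Int.floordiv_eq_ediv_of_pos (by omega : (0 : Int) < 2)]
        exact ⟨Int.ediv_nonneg (by omega) (by omega), Int.ediv_le_self _ (by omega)⟩
      set mid := l + PySem.Int.floordiv (r - l) 2 with hmiddef
      have hmid1 : l ≤ mid := by omega
      have hmid2 : mid ≤ r := by omega
      have hmidlen : mid.toNat < arr.length := by omega
      rw [pvPyGetD_getElem arr mid 0 (by omega) hmidlen]
      by_cases hp : p (arr[mid.toNat]'hmidlen) = true
      · rw [if_pos hp]
        apply ihN (mid + 1) r (by omega) (by omega) hrlen (by omega)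
        · intro k hk hkl
          exact hmono k mid.toNat (by omega) hmidlen hp
        · exact fun k hk hrk => hfalse k hk hrk
      · rw [if_neg hp]
        apply ihN l (mid - 1) (by omega) h0 (by omega) (by omega)
        · exact htrue
        · intro k hk hmk
          by_cases hkr : r < (k : Int)
          · exact hfalse k hk hkr
          · cases hq : p (arr[k]'hk) with
            | false => rfl
            | true => exact absurd (hmono mid.toNat k (by omega) hk hq) hp
    · rw [pvBS, dif_neg hle]
      refine ⟨by omega, hrlen, ?_⟩
      intro k hk
      constructor
      · intro hkr; exact htrue k hk (by omega)
      · intro hpk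
        by_contra hgt
        have hf := hfalse k hk (by omega)
        rw [hpk] at hf; cases hf

-- ---------- linear scan characterization ----------
lemma pvScan_split (p : Int → Bool) (l1 l2 : List Int) (b : Int)
    (h1 : ∀ x ∈ l1, p x = true) (h2 : ∀ y, l2.head? = some y → p y = false) :
    pvScan p b (l1 ++ l2) = l1.getLastD b := by
  induction l1 generalizing b with
  | nil =>
    cases l2 with
    | nil => rfl
    | cons y t =>
      simp only [List.nil_append, pvScan, List.getLastD_nil]
      rw [h2 y rfl]
      simp
  | cons x t ih =>
    have hx : p x = true := h1 x (List.mem_cons_self)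
    simp only [List.cons_append, pvScan, hx, if_true]
    rw [ih x (fun z hz => h1 z (List.mem_cons_of_mem _ hz)), List.getLastD_cons]

-- ---------- candidate values ----------
def pvVals (A : List (List Int)) (rows cols cap : Int) : List Int :=
  (PySem.List.pyRange 0 rows 1).flatMap (fun i =>
    ((PySem.List.pyRange 0 cols 1).filter (fun j => pvAt A i j ≤ cap)).map (fun j => pvAt A i j))

lemma pvVals_le {A : List (List Int)} {rows cols cap : Int} {x : Int}
    (hx : x ∈ pvVals A rows cols cap) : x ≤ cap := by
  unfold pvVals at hx
  obtain ⟨i, hi, hx2⟩ := List.mem_flatMap.mp hx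
  obtain ⟨j, hj, rfl⟩ := List.mem_map.mp hx2
  have := (List.mem_filter.mp hj).2
  simpa using this

lemma pvVals_mem (A : List (List Int)) (rows cols cap : Int) (c : Int × Int)
    (hc : pvInb rows cols c) (hle : pvAt A c.1 c.2 ≤ cap) :
    pvAt A c.1 c.2 ∈ pvVals A rows cols cap := by
  unfold pvVals
  apply List.mem_flatMap.mpr
  refine ⟨c.1, PySem.List.mem_pyRange_one.mpr ⟨hc.1, hc.2.1⟩, ?_⟩
  apply List.mem_map.mpr
  refine ⟨c.2, ?_, rfl⟩
  apply List.mem_filter.mpr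
  exact ⟨PySem.List.mem_pyRange_one.mpr ⟨hc.2.2.1, hc.2.2.2⟩, by simpa using hle⟩

lemma pvUnique_eq (A : List (List Int)) (rows cols cap : Int) :
    (PySem.List.pyRange 0 rows 1).foldl (fun u i =>
      (PySem.List.pyRange 0 cols 1).foldl (fun u j =>
        if pvAt A i j ≤ cap then PySem.Set.add u (pvAt A i j) else u) u) PySem.Set.empty
    = PySem.Set.ofList (pvVals A rows cols cap) := by
  rw [PySem.Set.ofList_eq_foldl]
  unfold pvVals
  rw [List.foldl_flatMap]
  apply PySem.List.foldl_congr_mem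
  intro acc x _
  rw [List.foldl_map, PySem.List.foldl_ite_eq_foldl_filter (fun j => pvAt A x j ≤ cap)
    (fun u j => PySem.Set.add u (pvAt A x j))]

-- ===== VERDICT (by name: the statement is the Claim_ definition above) =====
theorem maximumMinimumPath_spec : Claim_equal_maximumMinimumPath := by
  intro A _ hPre
  obtain ⟨hAne, hc0, hrag⟩ := hPre
  unfold Spec_maximumMinimumPath
  have hA0 : PySem.List.pyGetD A 0 [] = A.headI := by
    cases A with
    | nil => exact absurd rfl hAne
    | cons r0 rest => rw [PySem.List.pyGetD_zero_cons]; rfl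
  simp only [maximumMinimumPath, maximumMinimumPath_alt, hA0]
  set rows : Int := (A.length : Int) with hrowsdef
  set cols : Int := (A.headI.length : Int) with hcolsdef
  have hr : 0 < rows := by
    rw [hrowsdef]
    rcases A with _ | ⟨r0, rest⟩
    · exact absurd rfl hAne
    · simp only [List.length_cons]; push_cast; omega
  have hc : 0 < cols := by rw [hcolsdef]; exact_mod_cast hc0
  set cap : Int := min (pvAt A 0 0) (pvAt A (rows - 1) (cols - 1)) with hcapdef
  rw [pvUnique_eq A rows cols cap]
  have hBfold : ((PySem.List.pyRange 0 rows 1).flatMap (fun i =>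
      ((PySem.List.pyRange 0 cols 1).filter (fun j => pvAt A i j ≤ cap)).map
        (fun j => pvAt A i j))) = pvVals A rows cols cap := rfl
  rw [hBfold]
  rw [show (fun v => pvReachB A rows cols v) = (fun v => pvCheck A rows cols v) from
    funext (fun v => pvPred_eq A rows cols hr hc v)]
  set p : Int → Bool := fun v => pvCheck A rows cols v with hpdef
  set arr : List Int :=
    PySem.List.sorted (PySem.Set.ofList (pvVals A rows cols cap)) (fun x => x) false with harrdef
  -- arr is nonempty
  have hvne : ∃ x, x ∈ pvVals A rows cols cap := by
    rcases min_choice (pvAt A 0 0) (pvAt A (rows - 1) (cols - 1)) with hmc | hmc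
    · rw [← hcapdef] at hmc
      exact ⟨pvAt A 0 0, pvVals_mem A rows cols cap ((0 : Int), (0 : Int))
        ⟨le_refl 0, hr, le_refl 0, hc⟩ hmc.symm.le⟩
    · rw [← hcapdef] at hmc
      exact ⟨pvAt A (rows - 1) (cols - 1), pvVals_mem A rows cols cap (rows - 1, cols - 1)
        ⟨by omega, by omega, by omega, by omega⟩ hmc.symm.le⟩
  obtain ⟨x0, hx0⟩ := hvne
  have harrne : arr ≠ [] := by
    apply List.ne_nil_of_mem (a := x0)
    rw [harrdef]
    exact (PySem.List.mem_sorted _ _ _ _).mpr ((PySem.Set.mem_ofList _ _).mpr hx0)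
  have hlenpos : 0 < arr.length := by
    rcases harr0 : arr with _ | ⟨a, t⟩
    · exact absurd harr0 harrne
    · simp [harr0]
  -- smallest candidate bounds every candidate
  have hhead : ∀ y ∈ pvVals A rows cols cap, arr[0]'hlenpos ≤ y := by
    intro y hy
    obtain ⟨a0, t, harrc⟩ : ∃ a0 t, arr = a0 :: t := by
      cases harr0 : arr with
      | nil => exact absurd harr0 harrne
      | cons a t => exact ⟨a, t, rfl⟩
    have hb := PySem.List.key_head_sorted_le (PySem.Set.ofList (pvVals A rows cols cap))
      (fun x => x) (harrdef.symm.trans harrc)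
    have hgoal : arr[0]'hlenpos ≤ y := by
      simp only [harrc, List.getElem_cons_zero]
      exact hb y ((PySem.Set.mem_ofList _ _).mpr hy)
    exact hgoal
  -- all in-bounds cells are allowed at threshold arr[0]
  have hall : ∀ c, pvInb rows cols c → arr[0]'hlenpos ≤ pvAt A c.1 c.2 := by
    intro c hcinb
    by_cases hle : pvAt A c.1 c.2 ≤ cap
    · exact hhead _ (pvVals_mem A rows cols cap c hcinb hle)
    · have harrmem : ∀ x, x ∈ arr → x ∈ pvVals A rows cols cap := by
        intro x hxm
        rw [harrdef] at hxm
        exact (PySem.Set.mem_ofList _ _).mp ((PySem.List.mem_sorted _ _ _ _).mp hxm)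
      have h0v : arr[0]'hlenpos ∈ pvVals A rows cols cap :=
        harrmem _ (List.getElem_mem hlenpos)
      have := pvVals_le h0v
      omega
  -- the predicate is monotone along arr
  have hpiff : ∀ v, p v = true ↔ pvReach A rows cols v (0, 0) (rows - 1, cols - 1) :=
    fun v => pvCheck_iff A rows cols v hr hc
  have hmono : ∀ a b : Nat, (hab : a ≤ b) → (hb : b < arr.length) →
      p (arr[b]'hb) = true → p (arr[a]'(by omega)) = true := by
    intro a b hab hb hpb
    rw [hpiff] at hpb ⊢
    have hb2 : b < (PySem.List.sorted (PySem.Set.ofList (pvVals A rows cols cap)) (fun x => x)).length := by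
      rw [← harrdef]; exact hb
    have hmle := PySem.List.sorted_id_getElem_mono (PySem.Set.ofList (pvVals A rows cols cap)) hab hb2
    exact pvReach_mono hmle hpb
  have h0 : p (arr[0]'hlenpos) = true := by
    rw [hpiff]
    exact pvReach_all A rows cols _ hr hc hall
  -- binary search result
  obtain ⟨hR1, hR2, hRchar⟩ := pvBS_inv p arr hmono arr.length 0 ((arr.length : Int) - 1)
    (by omega) (le_refl 0) (by omega) (by omega)
    (fun k hk hlt => absurd hlt (by omega))
    (fun k hk hgt => absurd hgt (by push_cast; omega))
  set R := pvBS p arr 0 ((arr.length : Int) - 1) with hRdef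
  have hR0 : (0 : Int) ≤ R := (hRchar 0 hlenpos).mpr h0
  have hRlen : R.toNat < arr.length := by omega
  rw [pvPyGetD_getElem arr R 0 hR0 hRlen]
  rw [pvPyGetD_getElem arr 0 0 (le_refl 0) (by simpa using hlenpos)]
  set Rn := R.toNat with hRndef
  -- split arr[1:] at the boundary and characterize the scan
  have hsplit : arr.drop 1 = ((arr.drop 1).take Rn) ++ ((arr.drop 1).drop Rn) :=
    (List.take_append_drop _ _).symm
  rw [hsplit, pvScan_split]
  · -- the two answers coincide
    rcases Nat.eq_zero_or_pos Rn with hRn0 | hRnpos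
    · simp only [hRn0, List.take_zero, List.getLastD_nil, ← hRndef]
      rfl
    · have hl1len : ((arr.drop 1).take Rn).length = Rn := by
        rw [List.length_take, List.length_drop]
        omega
      have hidx : Rn - 1 < ((arr.drop 1).take Rn).length := by rw [hl1len]; omega
      rw [List.getLastD_eq_getLast?, List.getLast?_eq_getElem?, hl1len,
        List.getElem?_eq_getElem (by rw [hl1len]; omega)]
      simp only [Option.getD_some]
      rw [List.getElem_take, List.getElem_drop]
      have hidx2 : 1 + (Rn - 1) = Rn := by omega
      simp only [hidx2, ← hRndef]
  · -- everything before the boundary satisfies the predicate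
    intro x hx
    obtain ⟨idx, hidx, hxeq⟩ := List.getElem_of_mem hx
    have hidx2 : idx < Rn := by
      have h := hidx
      rw [List.length_take] at h
      omega
    have hirange : 1 + idx < arr.length := by
      have h := hidx
      rw [List.length_take, List.length_drop] at h
      omega
    have hxeq2 : x = arr[1 + idx]'hirange := by
      rw [← hxeq, List.getElem_take, List.getElem_drop]
    rw [hxeq2]
    exact (hRchar (1 + idx) hirange).mp (by push_cast; omega)
  · -- the first element past the boundary fails the predicate
    intro y hy
    rw [List.drop_drop, List.head?_drop] at hy
    have hrange : 1 + Rn < arr.length := by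
      by_contra hge
      rw [List.getElem?_eq_none (by omega)] at hy
      cases hy
    have hyeq : y = arr[1 + Rn]'hrange := by
      rw [List.getElem?_eq_getElem hrange] at hy
      exact (Option.some.inj hy).symm
    rw [hyeq]
    cases hq : p (arr[1 + Rn]'hrange) with
    | false => rfl
    | true =>
      have hch := (hRchar (1 + Rn) hrange).mpr hq
      push_cast at hch
      omega
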